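-- pv_equiv track=rewrite | github.com/sancovp/sanctuary-revolution-alpha | base/youknow-kernel/youknow_kernel/lang.py | _tokenize
-- ===== SOURCE A (Python) =====
-- from typing import Dict, List, Any, Optional, Callable
--
-- def _tokenize(source: str) -> List[str]:
--     """Simple tokenizer."""
--     source = source.replace('\n', ' ; ')
--     tokens = []
--     current = ""
--     for char in source:
--         if char in ' \t':
--             if current:
--                 tokens.append(current)
--                 current = ""
--         elif char in '[]{}(),;:':
--             if current:
--                 tokens.append(current)
--                 current = ""
--             tokens.append(char)
--         else:
--             current += char
--     if current:
--         tokens.append(current)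
--     return [t for t in tokens if t and not t.startswith('#')]
-- ===== SOURCE B (Python) =====
-- def _tokenize(source):
--     """Run-based tokenizer: slice out maximal word runs with two indices
--     instead of accumulating characters one by one, filtering comments inline."""
--     source = source.replace('\n', ' ; ')
--     delims = '[]{}(),;:'
--     stop = ' \t' + delims
--     out = []
--     i, n = 0, len(source)
--     while i < n:
--         c = source[i]
--         if c in ' \t':
--             i += 1
--         elif c in delims:
--             out.append(c)
--             i += 1
--         else:
--             j = i + 1
--             while j < n and source[j] not in stop:
--                 j += 1
--             word = source[i:j]
--             if not word.startswith('#'):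
--                 out.append(word)
--             i = j
--     return out
-- ===== Notes on version B (the rewrite author's own statement) =====
-- stated objective: alternative
-- what changed: Replaces A's char-by-char accumulator state machine (build `current`, flush it on space/delimiter, filter comments afterwards) by a two-index run tokenizer that skips spaces, emits delimiters, and slices out each maximal word run in one inner scan, filtering '#'-comments inline.
import Mathlib
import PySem

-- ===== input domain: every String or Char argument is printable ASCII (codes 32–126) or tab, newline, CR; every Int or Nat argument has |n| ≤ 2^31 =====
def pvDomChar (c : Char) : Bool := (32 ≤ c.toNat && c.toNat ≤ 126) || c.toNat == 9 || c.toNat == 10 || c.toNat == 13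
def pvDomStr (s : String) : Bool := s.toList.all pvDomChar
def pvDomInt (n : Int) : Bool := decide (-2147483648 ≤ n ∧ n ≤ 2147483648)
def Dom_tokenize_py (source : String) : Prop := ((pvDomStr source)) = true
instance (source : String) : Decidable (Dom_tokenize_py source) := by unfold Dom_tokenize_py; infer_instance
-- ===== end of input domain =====

-- B replaces A's char-by-char accumulator state machine by run extraction (skip
-- spaces, emit delimiters, slice a maximal word run) with the comment filter inline;
-- same return value, no speed claim.

-- ===== PORT A =====
-- tokens and the growing `current` string are kept as List Char (exact: String.ofList at the end)
def pyDelims : List Char := ['[', ']', '{', '}', '(', ')', ',', ';', ':']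

def pyStep (st : List (List Char) × List Char) (c : Char) :
    List (List Char) × List Char :=
  if c = ' ' ∨ c = '\t' then
    if st.2 ≠ [] then (st.1 ++ [st.2], []) else st
  else if c ∈ pyDelims then
    if st.2 ≠ [] then (st.1 ++ [st.2] ++ [[c]], []) else (st.1 ++ [[c]], [])
  else (st.1, st.2 ++ [c])

def tokenize_py (source : String) : List String :=
  let s := PySem.Str.replace source "\n" " ; "
  let st := s.toList.foldl pyStep ([], [])
  let tokens := if st.2 ≠ [] then st.1 ++ [st.2] else st.1
  (tokens.filter
      (fun t => decide (t ≠ []) && !(PySem.Chars.startswith t ['#']))).map String.ofList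

-- ===== PORT B =====
-- B's inner `while j < n and source[j] not in stop` / slice source[i:j] is the
-- takeWhile/dropWhile split of the rest of the char list (exact)
def altDelims : List Char := ['[', ']', '{', '}', '(', ')', ',', ';', ':']

def altWordChar (c : Char) : Bool :=
  !((c = ' ' ∨ c = '\t') ∨ c ∈ altDelims)

def altLoop : List Char → List (List Char)
  | [] => []
  | c :: rest =>
    if c = ' ' ∨ c = '\t' then altLoop rest
    else if c ∈ altDelims then [c] :: altLoop rest
    else
      let word := c :: rest.takeWhile altWordChar
      if PySem.Chars.startswith word ['#'] then altLoop (rest.dropWhile altWordChar)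
      else word :: altLoop (rest.dropWhile altWordChar)
termination_by cs => cs.length
decreasing_by
  all_goals
    simp only [List.length_cons]
    first
    | omega
    | exact Nat.lt_succ_of_le (List.length_dropWhile_le _ _)

def tokenize_py_alt (source : String) : List String :=
  (altLoop (PySem.Str.replace source "\n" " ; ").toList).map String.ofList

-- ===== PRECONDITION & SPEC =====
def Spec_tokenize_py (source : String) (out : List String) : Prop := out = tokenize_py_alt source
instance (source : String) (out : List String) : Decidable (Spec_tokenize_py source out) := by unfold Spec_tokenize_py; infer_instance

-- ===== CLAIM (what is proved, stated in full; the proofs are below) =====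
def Claim_equal_tokenize_py : Prop := ∀ (source : String), Dom_tokenize_py source → Spec_tokenize_py source (tokenize_py source)

-- ===== LEMMAS AND PROOFS =====

theorem pvAltDelims_eq : altDelims = pyDelims := rfl

def pvP (t : List Char) : Bool := decide (t ≠ []) && !(PySem.Chars.startswith t ['#'])

def pvFinalize (st : List (List Char) × List Char) : List (List Char) :=
  if st.2 ≠ [] then st.1 ++ [st.2] else st.1

theorem pvStep_shift (toks T : List (List Char)) (cur : List Char) (c : Char) :
    pyStep (toks ++ T, cur) c = (toks ++ (pyStep (T, cur) c).1, (pyStep (T, cur) c).2) := by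
  simp only [pyStep]
  split_ifs <;> simp

theorem pvFold_shift (cs : List Char) (toks : List (List Char)) (cur : List Char) :
    cs.foldl pyStep (toks, cur)
      = (toks ++ (cs.foldl pyStep ([], cur)).1, (cs.foldl pyStep ([], cur)).2) := by
  induction cs generalizing toks cur with
  | nil => simp
  | cons c cs ih =>
    simp only [List.foldl_cons]
    rw [show (toks, cur) = (toks ++ [], cur) by simp, pvStep_shift]
    rw [ih, ih (pyStep ([], cur) c).1]
    simp

theorem pvFold_run (run rest : List Char) (cur : List Char)
    (h : ∀ c ∈ run, altWordChar c = true) :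
    (run ++ rest).foldl pyStep ([], cur) = rest.foldl pyStep ([], cur ++ run) := by
  induction run generalizing cur with
  | nil => simp
  | cons c run ih =>
    have hc := h c (by simp)
    simp only [altWordChar, Bool.not_eq_true', decide_eq_false_iff_not, not_or] at hc
    simp only [List.cons_append, List.foldl_cons]
    rw [show pyStep ([], cur) c = ([], cur ++ [c]) by
      simp [pyStep, hc.1, pvAltDelims_eq ▸ hc.2]]
    rw [ih _ (fun d hd => h d (by simp [hd]))]
    simp

theorem pvDelim_p (c : Char) (h : c ∈ pyDelims) : pvP [c] = true := by
  simp only [pyDelims, List.mem_cons, List.not_mem_nil, or_false] at h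
  rcases h with h|h|h|h|h|h|h|h|h <;> subst h <;> decide

theorem pvFinalize_shift (toks A1 : List (List Char)) (cur : List Char) :
    pvFinalize (toks ++ A1, cur) = toks ++ pvFinalize (A1, cur) := by
  simp only [pvFinalize]
  split_ifs <;> simp

theorem pvDelim_not_space (c : Char) (h : c ∈ pyDelims) : ¬(c = ' ' ∨ c = '\t') := by
  simp only [pyDelims, List.mem_cons, List.not_mem_nil, or_false] at h
  rcases h with h|h|h|h|h|h|h|h|h <;> subst h <;> decide

theorem pvMain : ∀ n (cs : List Char), cs.length ≤ n →
    (pvFinalize (cs.foldl pyStep ([], []))).filter pvP = altLoop cs := by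
  intro n
  induction n with
  | zero =>
    intro cs h
    have : cs = [] := List.eq_nil_of_length_eq_zero (Nat.le_zero.mp h)
    subst this
    simp [pvFinalize, altLoop]
  | succ n ih =>
    intro cs h
    match cs with
    | [] => simp [pvFinalize, altLoop]
    | c :: rest =>
      simp only [List.length_cons, Nat.succ_le_succ_iff] at h
      by_cases hsp : c = ' ' ∨ c = '\t'
      · rw [altLoop]
        simp only [hsp, if_true, List.foldl_cons]
        rw [show pyStep ([], []) c = ([], []) by simp [pyStep, hsp]]
        exact ih rest h
      · by_cases hd : c ∈ pyDelims
        · rw [altLoop]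
          simp only [hsp, if_false, pvAltDelims_eq, hd, if_true, List.foldl_cons]
          rw [show pyStep ([], []) c = ([[c]], []) by simp [pyStep, hsp, hd]]
          rw [pvFold_shift, pvFinalize_shift]
          simp only [List.filter_append, List.singleton_append, List.filter_cons,
            pvDelim_p c hd, List.filter_nil, if_true]
          rw [ih rest h]
        · -- word character
          rw [altLoop]
          simp only [hsp, if_false, pvAltDelims_eq, hd]
          have hsplit : rest = rest.takeWhile altWordChar ++ rest.dropWhile altWordChar :=
            (List.takeWhile_append_dropWhile).symm
          have hrunw : ∀ d ∈ rest.takeWhile altWordChar, altWordChar d = true :=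
            fun d hd' => List.mem_takeWhile_imp hd'
          have hlen' : (rest.dropWhile altWordChar).length ≤ rest.length :=
            List.length_dropWhile_le _ _
          simp only [List.foldl_cons]
          rw [show pyStep ([], []) c = ([], [c]) by simp [pyStep, hsp, hd]]
          rw [show rest.foldl pyStep ([], [c])
              = (rest.takeWhile altWordChar ++ rest.dropWhile altWordChar).foldl
                  pyStep ([], [c]) by rw [← hsplit]]
          rw [pvFold_run _ _ [c] hrunw]
          have key : (pvFinalize ((rest.dropWhile altWordChar).foldl pyStep
                ([], [c] ++ rest.takeWhile altWordChar))).filter pvP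
              = (if pvP (c :: rest.takeWhile altWordChar)
                  then [c :: rest.takeWhile altWordChar] else [])
                ++ altLoop (rest.dropWhile altWordChar) := by
            rcases hr : rest.dropWhile altWordChar with _ | ⟨d, r⟩
            · rw [altLoop]
              simp only [pvFinalize, List.foldl_nil, List.foldl_nil, ne_eq,
                List.cons_ne_nil, not_false_iff, if_true, List.nil_append,
                List.filter_cons, List.filter_nil, List.append_nil]
              by_cases hpx : pvP (c :: rest.takeWhile altWordChar) = true <;>
                simp [hpx]
            · have hdw : altWordChar d = false := by
                have h0 : rest.dropWhile altWordChar ≠ [] := by rw [hr]; simp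
                have := List.head_dropWhile_not altWordChar h0
                rwa [show (rest.dropWhile altWordChar).head h0 = d by
                  simp only [hr, List.head_cons]] at this
              have hrlen : r.length ≤ n := by
                rw [hr] at hlen'; simp at hlen'; omega
              simp only [altWordChar, pvAltDelims_eq, Bool.not_eq_false', Bool.or_eq_true,
                decide_eq_true_eq] at hdw
              rw [altLoop]
              simp only [List.foldl_cons]
              rcases hdw with hdsp | hdd
              · rw [show pyStep ([], [c] ++ rest.takeWhile altWordChar) d
                    = ([[c] ++ rest.takeWhile altWordChar], []) by
                  simp [pyStep, hdsp]]
                rw [pvFold_shift, pvFinalize_shift]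
                simp only [hdsp, if_true, List.filter_append, List.singleton_append,
                  List.filter_cons, List.filter_nil]
                rw [ih r hrlen]
                split_ifs <;> simp
              · have hdsp' := pvDelim_not_space d hdd
                rw [show pyStep ([], [c] ++ rest.takeWhile altWordChar) d
                    = ([[c] ++ rest.takeWhile altWordChar, [d]], []) by
                  simp [pyStep, hdsp', hdd]]
                rw [pvFold_shift, pvFinalize_shift]
                simp only [hdsp', if_false, pvAltDelims_eq, hdd, if_true, List.filter_append,
                  List.filter_cons, List.filter_nil, pvDelim_p d hdd]
                rw [ih r hrlen]
                simp only [List.singleton_append]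
                split_ifs <;> simp
          rw [key]
          by_cases hp : PySem.Chars.startswith (c :: rest.takeWhile altWordChar) ['#'] = true
          · rw [show pvP (c :: rest.takeWhile altWordChar) = false by
              simp [pvP, hp]]
            simp [hp]
          · simp only [Bool.not_eq_true] at hp
            rw [show pvP (c :: rest.takeWhile altWordChar) = true by
              simp [pvP, hp]]
            simp [hp]

theorem pvCore (cs : List Char) :
    (pvFinalize (cs.foldl pyStep ([], []))).filter pvP = altLoop cs :=
  pvMain cs.length cs le_rfl

-- ===== VERDICT (by name: the statement is the Claim_ definition above) =====
theorem tokenize_py_spec : Claim_equal_tokenize_py := by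
  intro source _
  unfold Spec_tokenize_py tokenize_py tokenize_py_alt
  rw [← pvCore]
  rfl
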